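-- pv_equiv track=rewrite | github.com/dawoodaijaz97/Leetcode | split-array-by-prime-indices/solution.py | solve
-- ===== SOURCE A (Python) =====
-- def is_prime(n: int) -> bool:
--     """Check if a number is prime."""
--     if n <= 1:
--         return False
--     if n <= 3:
--         return True
--     if n % 2 == 0 or n % 3 == 0:
--         return False
--     i = 5
--     while i * i <= n:
--         if n % i == 0 or n % (i + 2) == 0:
--             return False
--         i += 6
--     return True
--
-- def solve(nums: list[int]) -> int:
--     """Return the absolute difference between the sums of elements at prime indices and other indices."""
--     sum_prime_indices = 0
--     sum_other_indices = 0
--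
--     for index, value in enumerate(nums):
--         if is_prime(index):
--             sum_prime_indices += value
--         else:
--             sum_other_indices += value
--
--     return abs(sum_prime_indices - sum_other_indices)
-- ===== SOURCE B (Python) =====
-- def solve(nums: list[int]) -> int:
--     """Return the absolute difference between the sums of elements at prime indices and other indices."""
--     n = len(nums)
--     # Sieve of Eratosthenes over the index range, then one summing pass.
--     sieve = [False, False] + [True] * (n - 2) if n >= 2 else [False] * n
--     p = 2
--     while p * p < n:
--         if sieve[p]:
--             for m in range(p * p, n, p):
--                 sieve[m] = False
--         p += 1
--     sp = sum(v for i, v in enumerate(nums) if sieve[i])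
--     total = sum(nums)
--     return abs(2 * sp - total)
-- ===== Notes on version B (the rewrite author's own statement) =====
-- stated objective: faster
-- what changed: Per-index trial-division primality test is replaced by one Sieve of Eratosthenes over the index range plus a single summing pass, and abs(sp-so) is computed as abs(2*sp-total).
import Mathlib
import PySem

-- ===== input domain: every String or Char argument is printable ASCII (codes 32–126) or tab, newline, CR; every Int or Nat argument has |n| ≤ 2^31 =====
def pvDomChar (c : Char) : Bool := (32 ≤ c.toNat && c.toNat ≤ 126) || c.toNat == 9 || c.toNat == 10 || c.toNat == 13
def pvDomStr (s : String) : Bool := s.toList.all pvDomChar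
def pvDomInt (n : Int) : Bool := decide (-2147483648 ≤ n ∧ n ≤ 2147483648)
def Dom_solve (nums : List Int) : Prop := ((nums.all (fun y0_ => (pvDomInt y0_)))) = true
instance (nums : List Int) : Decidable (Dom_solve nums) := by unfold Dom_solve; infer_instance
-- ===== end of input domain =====

-- B replaces A's per-index trial-division primality test by a Sieve of Eratosthenes over
-- the index range plus one summing pass (measurably faster on large inputs in a timing run).

-- ===== PORT A =====
-- the 'while i * i <= n: … i += 6' loop of is_prime; called only with n ≥ 5 (after the
-- earlier branches returned), where Nat arithmetic coincides with Python's int arithmetic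
def trialLoop (n i : Nat) : Bool :=
  if _h : i * i ≤ n then
    if n % i == 0 || n % (i + 2) == 0 then false
    else trialLoop n (i + 6)
  else true
termination_by n + 1 - i
decreasing_by
  rcases Nat.eq_zero_or_pos i with h0 | h0
  · omega
  · have : i ≤ i * i := Nat.le_mul_of_pos_left i h0
    omega

def is_prime (n : Int) : Bool :=
  if n ≤ 1 then false
  else if n ≤ 3 then true
  else if n % 2 == 0 || n % 3 == 0 then false  -- n ≥ 4 here, so Int '%' matches Python '%'
  else trialLoop n.toNat 5

def solve (nums : List Int) : Int :=
  let r := (PySem.List.enumerate nums).foldl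
    (fun (acc : Int × Int) iv =>
      if is_prime iv.1 then (acc.1 + iv.2, acc.2) else (acc.1, acc.2 + iv.2)) (0, 0)
  |r.1 - r.2|

-- ===== PORT B =====
-- 'while p * p < n: if sieve[p]: for m in range(p*p, n, p): sieve[m] = False; p += 1'
-- (all range elements are ≥ p*p ≥ 0, so .toNat on them is exact)
def sieveLoop (n : Nat) (s : List Bool) (p : Nat) : List Bool :=
  if _h : p * p < n then
    sieveLoop n
      (if s.getD p false then
        (PySem.List.pyRange ((p * p : Nat) : Int) (n : Int) (p : Int)).foldl
          (fun t m => t.set m.toNat false) s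
       else s)
      (p + 1)
  else s
termination_by n - p
decreasing_by
  rcases Nat.eq_zero_or_pos p with h0 | h0
  · omega
  · have : p ≤ p * p := Nat.le_mul_of_pos_left p h0
    omega

def solve_alt (nums : List Int) : Int :=
  let n := nums.length
  let sieve0 := if 2 ≤ n then false :: false :: List.replicate (n - 2) true
                else List.replicate n false
  let sieve := sieveLoop n sieve0 2
  let sp := (PySem.List.enumerate nums).foldl
    (fun (acc : Int) iv => if sieve.getD iv.1.toNat false then acc + iv.2 else acc) 0
  let total := nums.foldl (· + ·) 0
  |2 * sp - total|

-- ===== PRECONDITION & SPEC =====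
def Spec_solve (nums : List Int) (out : Int) : Prop := out = solve_alt nums
instance (nums : List Int) (out : Int) : Decidable (Spec_solve nums out) := by unfold Spec_solve; infer_instance

-- ===== CLAIM (what is proved, stated in full; the proofs are below) =====
def Claim_equal_solve : Prop := ∀ (nums : List Int), Dom_solve nums → Spec_solve nums (solve nums)

-- ===== LEMMAS AND PROOFS =====

lemma trialLoop_false {n i : Nat} (h : trialLoop n i = false) :
    ∃ d, i ≤ d ∧ (d - 2) * (d - 2) ≤ n ∧ n % d = 0 := by
  fun_induction trialLoop n i with
  | case1 i hle hdvd =>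
    simp only [Bool.or_eq_true, beq_iff_eq] at hdvd
    rcases hdvd with hd | hd
    · exact ⟨i, le_refl _, le_trans (Nat.mul_le_mul (by omega) (by omega)) hle, hd⟩
    · exact ⟨i + 2, by omega, by simpa using hle, hd⟩
  | case2 i hle hdvd ih =>
    obtain ⟨d, hd1, hd2, hd3⟩ := ih h
    exact ⟨d, by omega, hd2, hd3⟩
  | case3 i hle => simp at h

lemma trialLoop_true {n i : Nat} (h : trialLoop n i = true) :
    ∀ d, i ≤ d → d * d ≤ n → (d % 6 = i % 6 ∨ d % 6 = (i + 2) % 6) → n % d ≠ 0 := by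
  fun_induction trialLoop n i with
  | case1 i hle hdvd => simp at h
  | case2 i hle hdvd ih =>
    simp only [Bool.or_eq_true, beq_iff_eq] at hdvd
    push Not at hdvd
    intro d hid hdn hmod
    by_cases hd : d = i
    · subst hd; exact hdvd.1
    by_cases hd2 : d = i + 2
    · subst hd2; exact hdvd.2
    refine ih h d ?_ hdn ?_
    · omega
    · omega
  | case3 i hle =>
    intro d hid hdn hmod
    exact absurd (le_trans (Nat.mul_le_mul hid hid) hdn) hle

lemma isPrime_eq (k : Nat) : is_prime (k : Int) = decide (Nat.Prime k) := by
  unfold is_prime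
  split_ifs with h1 h3 hm
  · have hk : k ≤ 1 := by omega
    have : ¬ Nat.Prime k := fun hp => by have := hp.two_le; omega
    simp [this]
  · have hk : k = 2 ∨ k = 3 := by omega
    rcases hk with rfl | rfl <;> simp <;> decide
  · simp only [Bool.or_eq_true, beq_iff_eq] at hm
    have hk4 : 4 ≤ k := by omega
    have hdv : 2 ∣ k ∨ 3 ∣ k := by omega
    have : ¬ Nat.Prime k := by
      intro hp
      rcases hdv with h | h
      · rcases (Nat.Prime.eq_one_or_self_of_dvd hp 2 h) with h' | h' <;> omega
      · rcases (Nat.Prime.eq_one_or_self_of_dvd hp 3 h) with h' | h' <;> omega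
    simp [this]
  · simp only [Bool.or_eq_true, beq_iff_eq] at hm
    push Not at hm
    have hk5 : 5 ≤ k := by omega
    have h2 : ¬ 2 ∣ k := by omega
    have h3' : ¬ 3 ∣ k := by omega
    have htn : (k : Int).toNat = k := Int.toNat_natCast k
    rw [htn]
    by_cases hp : Nat.Prime k
    · cases htl : trialLoop k 5 with
      | true => simp [hp]
      | false =>
        exfalso
        obtain ⟨d, hd1, hd2, hd3⟩ := trialLoop_false htl
        have hdvd : d ∣ k := Nat.dvd_of_mod_eq_zero hd3
        rcases Nat.Prime.eq_one_or_self_of_dvd hp d hdvd with h' | h'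
        · omega
        · subst h'
          have h32 : 3 * (d - 2) ≤ (d - 2) * (d - 2) := Nat.mul_le_mul_right _ (by omega)
          omega
    · cases htl : trialLoop k 5 with
      | false => simp [hp]
      | true =>
        exfalso
        set q := k.minFac with hq
        have hqp : q.Prime := Nat.minFac_prime (by omega)
        have hqd : q ∣ k := Nat.minFac_dvd k
        have hqq : q * q ≤ k := by
          have := Nat.minFac_sq_le_self (by omega : 0 < k) hp
          simpa [pow_two] using this
        have hq2 : q ≠ 2 := fun h => h2 (h ▸ hqd)
        have hq3 : q ≠ 3 := fun h => h3' (h ▸ hqd)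
        have hq4 : q ≠ 4 := fun h => by rw [h] at hqp; exact absurd hqp (by decide)
        have hq5 : 5 ≤ q := by have := hqp.two_le; omega
        have hqm2 : ¬ 2 ∣ q := fun h => by
          rcases Nat.Prime.eq_one_or_self_of_dvd hqp 2 h with h' | h' <;> omega
        have hqm3 : ¬ 3 ∣ q := fun h => by
          rcases Nat.Prime.eq_one_or_self_of_dvd hqp 3 h with h' | h' <;> omega
        have hmod : q % 6 = 5 % 6 ∨ q % 6 = (5 + 2) % 6 := by omega
        exact trialLoop_true htl q hq5 hqq hmod (by omega)

-- sieve invariant: cell i is live iff i ≥ 2 and no prime below the current bound kills it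
def SieveInv (n p : Nat) (s : List Bool) : Prop :=
  s.length = n ∧ ∀ i, i < n →
    (s.getD i false = true ↔ 2 ≤ i ∧ ∀ q, q < p → Nat.Prime q → q * q ≤ i → ¬ q ∣ i)

lemma foldl_set_length (ms : List Int) (s : List Bool) :
    (ms.foldl (fun t m => t.set m.toNat false) s).length = s.length := by
  induction ms generalizing s with
  | nil => rfl
  | cons m ms ih => simp [ih]

lemma foldl_set_getD (ms : List Int) (s : List Bool) (j : Nat)
    (hms : ∀ m ∈ ms, 0 ≤ m ∧ m.toNat < s.length) :
    (ms.foldl (fun t m => t.set m.toNat false) s).getD j false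
      = if (j : Int) ∈ ms then false else s.getD j false := by
  induction ms generalizing s with
  | nil => simp
  | cons m ms ih =>
    simp only [List.foldl_cons]
    rw [ih (s.set m.toNat false) (by
      intro x hx
      have := hms x (List.mem_cons_of_mem _ hx)
      simpa [List.length_set] using this)]
    by_cases hj : (j : Int) ∈ ms
    · simp [hj]
    · have hm := hms m (List.mem_cons_self ..)
      by_cases hjm : (j : Int) = m
      · have hje : m.toNat = j := by omega
        rw [if_neg hj, List.getD_eq_getElem?_getD, hje, List.getElem?_set_self (hje ▸ hm.2)]
        simp [List.mem_cons, hjm]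
      · have hne : m.toNat ≠ j := by omega
        simp only [List.mem_cons, hjm, hj, or_self, if_neg, not_false_iff]
        rw [List.getD_eq_getElem?_getD, List.getElem?_set_ne hne, ← List.getD_eq_getElem?_getD]

lemma mem_marks {n p i : Nat} (hp : 0 < p) :
    ((i : Int) ∈ PySem.List.pyRange ((p * p : Nat) : Int) (n : Int) (p : Int))
      ↔ (p * p ≤ i ∧ i < n ∧ p ∣ i) := by
  rw [PySem.List.mem_pyRange_iff_of_pos (by exact_mod_cast hp)]
  constructor
  · rintro ⟨h1, h2, h3⟩
    refine ⟨by exact_mod_cast h1, by exact_mod_cast h2, ?_⟩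
    have hpp : (p : Int) ∣ ((p * p : Nat) : Int) := by push_cast; exact Dvd.intro p rfl
    have : (p : Int) ∣ (i : Int) := by
      have := dvd_add h3 hpp
      simpa using this
    exact_mod_cast this
  · rintro ⟨h1, h2, h3⟩
    refine ⟨by exact_mod_cast h1, by exact_mod_cast h2, ?_⟩
    have h3' : (p : Int) ∣ (i : Int) := by exact_mod_cast h3
    have hpp : (p : Int) ∣ ((p * p : Nat) : Int) := by push_cast; exact Dvd.intro p rfl
    exact dvd_sub h3' hpp

-- a live cell at the loop pointer means the pointer is prime, a dead one that it is composite
lemma inv_at_p {n p : Nat} {s : List Bool} (hp : 2 ≤ p) (hpn : p < n) (inv : SieveInv n p s) :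
    (s.getD p false = true ↔ Nat.Prime p) := by
  rw [(inv.2 p hpn)]
  constructor
  · rintro ⟨h2, hall⟩
    by_contra hnp
    have hq : p.minFac ∣ p := Nat.minFac_dvd p
    have hqp : p.minFac.Prime := Nat.minFac_prime (by omega)
    have hqq : p.minFac * p.minFac ≤ p := by
      have := Nat.minFac_sq_le_self (by omega : 0 < p) hnp
      simpa [pow_two] using this
    have hqlt : p.minFac < p := by
      have hle : p.minFac ≤ p := Nat.le_of_dvd (by omega) hq
      have : p.minFac ≠ p := fun h => hnp (Nat.prime_def_minFac.mpr ⟨hp, h⟩)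
      omega
    exact hall p.minFac hqlt hqp hqq hq
  · intro hpp
    refine ⟨hp, fun q hqlt hqp hqq hqd => ?_⟩
    rcases (Nat.Prime.eq_one_or_self_of_dvd hpp q hqd) with h | h
    · exact absurd h (Nat.Prime.ne_one hqp)
    · omega

lemma sieveLoop_inv (n : Nat) : ∀ p s, 2 ≤ p → SieveInv n p s →
    ∃ pf, p ≤ pf ∧ ¬ pf * pf < n ∧ SieveInv n pf (sieveLoop n s p) := by
  intro p s
  fun_induction sieveLoop n s p with
  | case1 s p hlt ih =>
    intro hp2 inv
    have hpn : p < n := by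
      have : p ≤ p * p := Nat.le_mul_of_pos_left p (by omega)
      omega
    have hinv' : SieveInv n (p + 1)
        (if s.getD p false then
          (PySem.List.pyRange ((p * p : Nat) : Int) (n : Int) (p : Int)).foldl
            (fun t m => t.set m.toNat false) s
         else s) := by
      by_cases hsp : s.getD p false
      · -- p is prime; its multiples from p*p get marked
        have hpp : Nat.Prime p := (inv_at_p hp2 hpn inv).mp hsp
        rw [if_pos hsp]
        constructor
        · rw [foldl_set_length]; exact inv.1
        · intro i hi
          rw [foldl_set_getD _ _ _ (by
            intro m hm
            have h0 : (0 : Int) ≤ ((p * p : Nat) : Int) := by positivity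
            have := (PySem.List.mem_pyRange_iff_of_pos (by exact_mod_cast (by omega : 0 < p)) m).mp hm
            constructor
            · omega
            · rw [inv.1]; omega)]
          by_cases hmem : (i : Int) ∈ PySem.List.pyRange ((p * p : Nat) : Int) (n : Int) (p : Int)
          · rw [if_pos hmem]
            obtain ⟨h1, h2, h3⟩ := (mem_marks (by omega)).mp hmem
            simp only [Bool.false_eq_true, false_iff]
            rintro ⟨-, hall⟩
            exact hall p (Nat.lt_succ_self p) hpp h1 h3
          · rw [if_neg hmem, (inv.2 i hi)]
            constructor
            · rintro ⟨h2, hall⟩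
              refine ⟨h2, fun q hqlt hqp hqq hqd => ?_⟩
              rcases Nat.lt_succ_iff_lt_or_eq.mp hqlt with h | rfl
              · exact hall q h hqp hqq hqd
              · exact hmem ((mem_marks (by omega)).mpr ⟨hqq, hi, hqd⟩)
            · rintro ⟨h2, hall⟩
              exact ⟨h2, fun q hqlt hqp hqq hqd => hall q (by omega) hqp hqq hqd⟩
      · -- p is composite; nothing is marked and the bound still advances
        have hnp : ¬ Nat.Prime p := fun h => hsp ((inv_at_p hp2 hpn inv).mpr h)
        rw [if_neg hsp]
        refine ⟨inv.1, fun i hi => ?_⟩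
        rw [(inv.2 i hi)]
        constructor
        · rintro ⟨h2, hall⟩
          refine ⟨h2, fun q hqlt hqp hqq hqd => ?_⟩
          rcases Nat.lt_succ_iff_lt_or_eq.mp hqlt with h | rfl
          · exact hall q h hqp hqq hqd
          · exact absurd hqp hnp
        · rintro ⟨h2, hall⟩
          exact ⟨h2, fun q hqlt hqp hqq hqd => hall q (by omega) hqp hqq hqd⟩
    obtain ⟨pf, hpf1, hpf2, hpf3⟩ := ih (by omega) hinv'
    exact ⟨pf, by omega, hpf2, hpf3⟩
  | case2 s p hlt =>
    intro hp2 inv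
    exact ⟨p, le_refl p, hlt, inv⟩

lemma sieve_final (nums : List Int) (i : Nat) (hi : i < nums.length) :
    (sieveLoop nums.length
      (if 2 ≤ nums.length then false :: false :: List.replicate (nums.length - 2) true
       else List.replicate nums.length false) 2).getD i false = decide (Nat.Prime i) := by
  set n := nums.length with hn
  have inv0 : SieveInv n 2
      (if 2 ≤ n then false :: false :: List.replicate (n - 2) true
       else List.replicate n false) := by
    by_cases h2 : 2 ≤ n
    · rw [if_pos h2]
      refine ⟨by simp; omega, fun j hj => ?_⟩
      match j with
      | 0 => simp
      | 1 => simp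
      | (j + 2) =>
        simp only [List.getD_cons_succ]
        rw [List.getD_replicate _ (by omega)]
        constructor
        · intro _; exact ⟨by omega, fun q hq hqp => by have := hqp.two_le; omega⟩
        · intro _; rfl
    · rw [if_neg h2]
      refine ⟨by simp, fun j hj => ?_⟩
      rw [List.getD_replicate _ hj]
      simp only [Bool.false_eq_true, false_iff]
      rintro ⟨hj2, -⟩
      omega
  obtain ⟨pf, hpf1, hpf2, hlen, hchar⟩ := sieveLoop_inv n 2 _ (le_refl 2) inv0
  rw [Bool.eq_iff_iff, hchar i hi]
  simp only [decide_eq_true_eq]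
  constructor
  · rintro ⟨h2, hall⟩
    by_contra hp
    have hqp : i.minFac.Prime := Nat.minFac_prime (by omega)
    have hqq : i.minFac * i.minFac ≤ i := by
      have := Nat.minFac_sq_le_self (by omega : 0 < i) hp
      simpa [pow_two] using this
    have hqlt : i.minFac < pf := by
      by_contra hge
      have : pf * pf ≤ i.minFac * i.minFac := Nat.mul_le_mul (by omega) (by omega)
      omega
    exact hall i.minFac hqlt hqp hqq (Nat.minFac_dvd i)
  · intro hp
    refine ⟨hp.two_le, fun q hqlt hqp hqq hqd => ?_⟩
    rcases Nat.Prime.eq_one_or_self_of_dvd hp q hqd with h | h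
    · exact absurd h (Nat.Prime.ne_one hqp)
    · subst h
      have := hp.two_le
      nlinarith

lemma pair_foldl (l : List (Int × Int)) (pr : Int × Int → Bool) (a b : Int) :
    l.foldl (fun acc iv => if pr iv then (acc.1 + iv.2, acc.2) else (acc.1, acc.2 + iv.2)) (a, b)
      = (a + (l.map (fun iv => if pr iv then iv.2 else 0)).sum,
         b + (l.map (fun iv => if pr iv then 0 else iv.2)).sum) := by
  induction l generalizing a b with
  | nil => simp
  | cons x l ih =>
    simp only [List.foldl_cons, List.map_cons, List.sum_cons]
    by_cases h : pr x <;> simp only [h, if_pos, Bool.false_eq_true, ite_false] <;>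
      rw [ih] <;> refine Prod.ext ?_ ?_ <;> simp <;> ring

lemma cond_foldl (l : List (Int × Int)) (pr : Int × Int → Bool) (a : Int) :
    l.foldl (fun acc iv => if pr iv then acc + iv.2 else acc) a
      = a + (l.map (fun iv => if pr iv then iv.2 else 0)).sum := by
  induction l generalizing a with
  | nil => simp
  | cons x l ih =>
    simp only [List.foldl_cons, List.map_cons, List.sum_cons]
    by_cases h : pr x <;> simp only [h, Bool.false_eq_true, ite_true, ite_false] <;>
      rw [ih] <;> ring

lemma sum_split (l : List (Int × Int)) (pr : Int × Int → Bool) :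
    (l.map (fun iv => if pr iv then iv.2 else 0)).sum
      + (l.map (fun iv => if pr iv then 0 else iv.2)).sum = (l.map (fun iv => iv.2)).sum := by
  induction l with
  | nil => simp
  | cons x l ih =>
    simp only [List.map_cons, List.sum_cons]
    by_cases h : pr x <;> simp only [h, Bool.false_eq_true, ite_true, ite_false] <;>
      rw [← ih] <;> ring

-- ===== VERDICT (by name: the statement is the Claim_ definition above) =====
theorem solve_spec : Claim_equal_solve := by
  intro nums _
  unfold Spec_solve solve solve_alt
  simp only []
  set l := PySem.List.enumerate nums with hl
  have hcongrA : l.foldl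
      (fun (acc : Int × Int) iv =>
        if is_prime iv.1 then (acc.1 + iv.2, acc.2) else (acc.1, acc.2 + iv.2)) (0, 0)
    = l.foldl
      (fun (acc : Int × Int) iv =>
        if decide (Nat.Prime iv.1.toNat) then (acc.1 + iv.2, acc.2) else (acc.1, acc.2 + iv.2)) (0, 0) := by
    apply PySem.List.foldl_congr_mem
    intro acc iv hiv
    obtain ⟨k, hk, rfl⟩ := (PySem.List.mem_enumerate_iff nums 0 iv).mp hiv
    simp only [zero_add]
    rw [isPrime_eq k, Int.toNat_natCast]
  have hcongrB : l.foldl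
      (fun (acc : Int) iv =>
        if (sieveLoop nums.length
            (if 2 ≤ nums.length then false :: false :: List.replicate (nums.length - 2) true
             else List.replicate nums.length false) 2).getD iv.1.toNat false
         then acc + iv.2 else acc) 0
    = l.foldl
      (fun (acc : Int) iv => if decide (Nat.Prime iv.1.toNat) then acc + iv.2 else acc) 0 := by
    apply PySem.List.foldl_congr_mem
    intro acc iv hiv
    obtain ⟨k, hk, rfl⟩ := (PySem.List.mem_enumerate_iff nums 0 iv).mp hiv
    simp only [zero_add]
    rw [Int.toNat_natCast, sieve_final nums k hk]
  rw [hcongrA, hcongrB, pair_foldl, cond_foldl]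
  have htot : nums.foldl (· + ·) 0 = (l.map (fun iv => iv.2)).sum := by
    rw [hl, PySem.List.map_snd_enumerate, List.sum_eq_foldl]
  rw [htot, ← sum_split l (fun iv => decide (Nat.Prime iv.1.toNat))]
  congr 1
  ring
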